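-- pv_equiv track=rewrite | github.com/rhpvorderman/sequali | src/sequali/util.py | fastq_header_is_nanopore
-- ===== SOURCE A (Python) =====
-- import string
--
-- def fastq_header_is_nanopore(header: str):
--     # Nanopore works with UUIDs such as
--     # 35eb0273-89e2-4093-98ed-d81cbdafcac7
--     # After that the metadata is several parts in the form of name=data each
--     # of the parts separated by a space. 'ch' for channel and 'start_time' are
--     # present in guppy called FASTQ files.
--     name, *metadata = header.split()  # type: str, List[str]
--     if name.count("-") == 4:
--         hexdigits = set(string.hexdigits)
--         parts = name.split('-')
--         hexadecimal = all(set(part).issubset(hexdigits) for part in parts)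
--         correct_lengths = all(
--             len(part) == correct_length for part, correct_length in
--             zip(parts, (8, 4, 4, 4, 12)))
--         # Test only for ch (no =) and for st (no art_time) so also ubam to
--         # converted FASTQ files are included.
--         has_ch = any(meta.startswith("ch") for meta in metadata)
--         has_start_time = any(meta.startswith("st")
--                              for meta in metadata)
--         if hexadecimal and correct_lengths and has_ch and has_start_time:
--             return True
--     return False
-- ===== SOURCE B (Python) =====
-- import re
--
-- # Nanopore UUID: 8-4-4-4-12 hex groups, e.g. 35eb0273-89e2-4093-98ed-d81cbdafcac7
-- _NANOPORE_UUID = re.compile(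
--     r'[0-9a-fA-F]{8}-[0-9a-fA-F]{4}-[0-9a-fA-F]{4}-[0-9a-fA-F]{4}-[0-9a-fA-F]{12}')
--
--
-- def fastq_header_is_nanopore(header: str):
--     name, *metadata = header.split()
--     return (_NANOPORE_UUID.fullmatch(name) is not None
--             and any(meta.startswith("ch") for meta in metadata)
--             and any(meta.startswith("st") for meta in metadata))
-- ===== Notes on version B (the rewrite author's own statement) =====
-- stated objective: idiomatic
-- what changed: The count('-')==4 guard, name.split('-'), per-part set-issubset hex check and zip-based length check are replaced by a single precompiled regex fullmatch of the fixed 8-4-4-4-12 hex UUID pattern (one left-to-right scan of the name); the two metadata prefix scans are kept.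
import Mathlib
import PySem

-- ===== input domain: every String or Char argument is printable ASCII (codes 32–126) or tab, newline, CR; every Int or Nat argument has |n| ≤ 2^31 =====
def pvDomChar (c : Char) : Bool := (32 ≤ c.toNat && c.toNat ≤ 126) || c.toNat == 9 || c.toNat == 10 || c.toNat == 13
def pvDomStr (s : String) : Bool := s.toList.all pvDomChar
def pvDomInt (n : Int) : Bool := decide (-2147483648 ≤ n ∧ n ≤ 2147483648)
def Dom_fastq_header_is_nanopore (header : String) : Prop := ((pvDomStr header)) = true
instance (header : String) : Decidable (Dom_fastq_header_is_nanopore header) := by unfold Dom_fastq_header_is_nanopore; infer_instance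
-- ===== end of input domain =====

-- B replaces A's count/split/set-subset/zip UUID validation by a single full-match of the fixed
-- UUID pattern (8-4-4-4-12 hex groups), one left-to-right scan of the name; equal return values on
-- every header containing a non-whitespace character (on whitespace-only headers both Pythons raise).

-- ===== PORT A =====
-- string.hexdigits as the set A builds ('0123456789abcdefABCDEF')
def pvHexdigits : PySem.Set Char := PySem.Set.ofList ['0','1','2','3','4','5','6','7','8','9','a','b','c','d','e','f','A','B','C','D','E','F']

def fastq_header_is_nanopore (header : String) : Bool :=
  match PySem.Str.split₀ header with
  | [] => false   -- Python: 'name, *metadata = []' raises ValueError; excluded by Pre_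
  | name :: metadata =>
    if PySem.Str.count name "-" == 4 then
      -- name.split('-') (Chars form of str.split(sep); there is no Str wrapper for splitOn)
      let parts : List (List Char) := PySem.Chars.splitOn name.toList "-".toList
      let hexadecimal := parts.all (fun part => PySem.Set.issubset (PySem.Set.ofList part) pvHexdigits)
      let correct_lengths := (parts.zip [8, 4, 4, 4, 12]).all (fun pc => pc.1.length == pc.2)
      let has_ch := metadata.any (fun m => PySem.Str.startswith m "ch")
      let has_start_time := metadata.any (fun m => PySem.Str.startswith m "st")
      if hexadecimal && correct_lengths && has_ch && has_start_time then true else false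
    else false

-- ===== PORT B =====
-- the regex character class [0-9a-fA-F]
def pvIsHex (c : Char) : Bool :=
  (('0' ≤ c && c ≤ '9') || ('a' ≤ c && c ≤ 'f') || ('A' ≤ c && c ≤ 'F'))

-- consume exactly n hex chars (regex [0-9a-fA-F]{n}); none = no match
def pvHexRun : Nat → List Char → Option (List Char)
  | 0, cs => some cs
  | _ + 1, [] => none
  | n + 1, c :: cs => if pvIsHex c then pvHexRun n cs else none

-- consume one '-'
def pvDash : List Char → Option (List Char)
  | '-' :: cs => some cs
  | _ => none

-- hand port of re.fullmatch(r'[0-9a-fA-F]{8}-…{4}-…{4}-…{4}-…{12}', name) is not None: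
-- sequential consumption of the fixed pattern; fullmatch = the whole string is consumed (some []).
def pvUuidFullmatch (name : String) : Bool :=
  ((((((((pvHexRun 8 name.toList).bind pvDash).bind (pvHexRun 4)).bind pvDash).bind
      (pvHexRun 4)).bind pvDash).bind (pvHexRun 4)).bind pvDash).bind (pvHexRun 12) == some []

def fastq_header_is_nanopore_alt (header : String) : Bool :=
  match PySem.Str.split₀ header with
  | [] => false   -- Python: unpacking raises ValueError; excluded by Pre_
  | name :: metadata =>
    pvUuidFullmatch name
      && metadata.any (fun m => PySem.Str.startswith m "ch")
      && metadata.any (fun m => PySem.Str.startswith m "st")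

-- ===== PRECONDITION & SPEC =====
-- Pre_ excludes exactly the headers with no non-whitespace character: there 'name, *metadata =
-- header.split()' raises ValueError in both Pythons (A and B), so neither returns a value.
def Pre_fastq_header_is_nanopore (header : String) : Prop := PySem.Str.split₀ header ≠ []
instance (header : String) : Decidable (Pre_fastq_header_is_nanopore header) := by unfold Pre_fastq_header_is_nanopore; infer_instance

def pvWitness_fastq_header_is_nanopore : String :=
  "35eb0273-89e2-4093-98ed-d81cbdafcac7 runid=5 ch=92 start_time=2019-10-01T20:53:28Z"

def Spec_fastq_header_is_nanopore (header : String) (out : Bool) : Prop := out = fastq_header_is_nanopore_alt header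
instance (header : String) (out : Bool) : Decidable (Spec_fastq_header_is_nanopore header out) := by unfold Spec_fastq_header_is_nanopore; infer_instance

-- ===== CLAIM (what is proved, stated in full; the proofs are below) =====
def Claim_equal_fastq_header_is_nanopore : Prop := ∀ (header : String), Dom_fastq_header_is_nanopore header → Pre_fastq_header_is_nanopore header → Spec_fastq_header_is_nanopore header (fastq_header_is_nanopore header)

-- ===== LEMMAS AND PROOFS =====

lemma pv_char_eq_of_toNat {c d : Char} (h : c.val.toNat = d.val.toNat) : c = d := by
  apply Char.ext; exact UInt32.toNat_inj.mp h

lemma pv_hex_eq (c : Char) : pvHexdigits.contains c = pvIsHex c := by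
  rw [Bool.eq_iff_iff]
  rw [show pvHexdigits = ['0','1','2','3','4','5','6','7','8','9','a','b','c','d','e','f','A','B','C','D','E','F'] from by decide]
  constructor
  · intro h
    simp only [PySem.Set.contains, List.contains_eq_mem, decide_eq_true_eq,
      List.mem_cons, List.not_mem_nil, or_false] at h
    rcases h with rfl|rfl|rfl|rfl|rfl|rfl|rfl|rfl|rfl|rfl|rfl|rfl|rfl|rfl|rfl|rfl|rfl|rfl|rfl|rfl|rfl|rfl <;> decide
  · intro h
    simp only [pvIsHex, Bool.or_eq_true, Bool.and_eq_true, decide_eq_true_eq, Char.le_def,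
      UInt32.le_iff_toNat_le] at h
    have hn : c.val.toNat = 48 ∨
        c.val.toNat = 49 ∨
        c.val.toNat = 50 ∨
        c.val.toNat = 51 ∨
        c.val.toNat = 52 ∨
        c.val.toNat = 53 ∨
        c.val.toNat = 54 ∨
        c.val.toNat = 55 ∨
        c.val.toNat = 56 ∨
        c.val.toNat = 57 ∨
        c.val.toNat = 97 ∨
        c.val.toNat = 98 ∨
        c.val.toNat = 99 ∨
        c.val.toNat = 100 ∨
        c.val.toNat = 101 ∨
        c.val.toNat = 102 ∨
        c.val.toNat = 65 ∨
        c.val.toNat = 66 ∨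
        c.val.toNat = 67 ∨
        c.val.toNat = 68 ∨
        c.val.toNat = 69 ∨
        c.val.toNat = 70 := by
      have e1 : ('0' : Char).val.toNat = 48 := rfl
      have e2 : ('9' : Char).val.toNat = 57 := rfl
      have e3 : ('a' : Char).val.toNat = 97 := rfl
      have e4 : ('f' : Char).val.toNat = 102 := rfl
      have e5 : ('A' : Char).val.toNat = 65 := rfl
      have e6 : ('F' : Char).val.toNat = 70 := rfl
      omega
    rcases hn with h|h|h|h|h|h|h|h|h|h|h|h|h|h|h|h|h|h|h|h|h|h
    · rw [pv_char_eq_of_toNat (show c.val.toNat = ('0' : Char).val.toNat from h)]; decide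
    · rw [pv_char_eq_of_toNat (show c.val.toNat = ('1' : Char).val.toNat from h)]; decide
    · rw [pv_char_eq_of_toNat (show c.val.toNat = ('2' : Char).val.toNat from h)]; decide
    · rw [pv_char_eq_of_toNat (show c.val.toNat = ('3' : Char).val.toNat from h)]; decide
    · rw [pv_char_eq_of_toNat (show c.val.toNat = ('4' : Char).val.toNat from h)]; decide
    · rw [pv_char_eq_of_toNat (show c.val.toNat = ('5' : Char).val.toNat from h)]; decide
    · rw [pv_char_eq_of_toNat (show c.val.toNat = ('6' : Char).val.toNat from h)]; decide
    · rw [pv_char_eq_of_toNat (show c.val.toNat = ('7' : Char).val.toNat from h)]; decide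
    · rw [pv_char_eq_of_toNat (show c.val.toNat = ('8' : Char).val.toNat from h)]; decide
    · rw [pv_char_eq_of_toNat (show c.val.toNat = ('9' : Char).val.toNat from h)]; decide
    · rw [pv_char_eq_of_toNat (show c.val.toNat = ('a' : Char).val.toNat from h)]; decide
    · rw [pv_char_eq_of_toNat (show c.val.toNat = ('b' : Char).val.toNat from h)]; decide
    · rw [pv_char_eq_of_toNat (show c.val.toNat = ('c' : Char).val.toNat from h)]; decide
    · rw [pv_char_eq_of_toNat (show c.val.toNat = ('d' : Char).val.toNat from h)]; decide
    · rw [pv_char_eq_of_toNat (show c.val.toNat = ('e' : Char).val.toNat from h)]; decide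
    · rw [pv_char_eq_of_toNat (show c.val.toNat = ('f' : Char).val.toNat from h)]; decide
    · rw [pv_char_eq_of_toNat (show c.val.toNat = ('A' : Char).val.toNat from h)]; decide
    · rw [pv_char_eq_of_toNat (show c.val.toNat = ('B' : Char).val.toNat from h)]; decide
    · rw [pv_char_eq_of_toNat (show c.val.toNat = ('C' : Char).val.toNat from h)]; decide
    · rw [pv_char_eq_of_toNat (show c.val.toNat = ('D' : Char).val.toNat from h)]; decide
    · rw [pv_char_eq_of_toNat (show c.val.toNat = ('E' : Char).val.toNat from h)]; decide
    · rw [pv_char_eq_of_toNat (show c.val.toNat = ('F' : Char).val.toNat from h)]; decide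

lemma pv_count_go_dash (l : List Char) : ∀ (fuel : Nat) (acc : Nat), l.length ≤ fuel →
    PySem.Chars.count.go ['-'] fuel l acc = acc + l.count '-' := by
  induction l with
  | nil => intro fuel acc h; cases fuel <;> simp [PySem.Chars.count.go]
  | cons c rest ih =>
    intro fuel acc h
    cases fuel with
    | zero => simp at h
    | succ n =>
      rw [PySem.Chars.count.go]
      by_cases hc : c = '-'
      · subst hc
        rw [if_pos (by simp [List.isPrefixOf])]
        simp only [List.length_singleton, List.drop_succ_cons, List.drop_zero]
        simp only [List.length_cons] at h
        rw [ih n (acc+1) (by omega)]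
        simp
        omega
      · rw [if_neg (by simp [List.isPrefixOf]; exact fun hh => (hc hh.symm))]
        rw [ih n acc (by simpa using Nat.le_of_succ_le_succ h)]
        simp [List.count_cons]
        intro hcc; exact hc hcc
lemma pv_count_dash (l : List Char) : PySem.Chars.count l ['-'] = l.count '-' := by
  simp [PySem.Chars.count, pv_count_go_dash l l.length 0 le_rfl]

def pvSplitAux : List Char → List Char → List (List Char)
  | [], cur => [cur.reverse]
  | c :: rest, cur => if c = '-' then cur.reverse :: pvSplitAux rest [] else pvSplitAux rest (c :: cur)

lemma pv_splitOn_go_dash (l : List Char) : ∀ (fuel : Nat) (cur : List Char) (acc : List (List Char)),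
    l.length ≤ fuel →
    PySem.Chars.splitOn.go ['-'] fuel l cur acc = acc.reverse ++ pvSplitAux l cur := by
  induction l with
  | nil =>
    intro fuel cur acc h
    cases fuel <;> simp [PySem.Chars.splitOn.go, pvSplitAux]
  | cons c rest ih =>
    intro fuel cur acc h
    cases fuel with
    | zero => simp at h
    | succ n =>
      rw [PySem.Chars.splitOn.go]
      simp only [List.length_cons] at h
      by_cases hc : c = '-'
      · subst hc
        rw [if_pos (by simp [List.isPrefixOf])]
        simp only [List.length_singleton, List.drop_succ_cons, List.drop_zero]
        rw [ih n [] (cur.reverse :: acc) (by omega)]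
        simp [pvSplitAux]
      · rw [if_neg (by simp [List.isPrefixOf]; exact fun hh => (hc hh.symm))]
        rw [ih n (c :: cur) acc (by omega)]
        simp [pvSplitAux, hc]

lemma pv_splitOn_dash (l : List Char) : PySem.Chars.splitOn l ['-'] = pvSplitAux l [] := by
  simp [PySem.Chars.splitOn, pv_splitOn_go_dash l (l.length + 1) [] [] (by omega)]

lemma pv_splitAux_append {a : List Char} (ha : '-' ∉ a) :
    ∀ (l cur : List Char), pvSplitAux (a ++ l) cur = pvSplitAux l (a.reverse ++ cur) := by
  induction a with
  | nil => intro l cur; simp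
  | cons x xs ih =>
    intro l cur
    simp only [List.mem_cons, not_or] at ha
    simp only [List.cons_append, pvSplitAux,
      if_neg (show ¬ x = '-' from fun h => ha.1 h.symm)]
    rw [ih ha.2 l (x :: cur)]
    simp

lemma pv_splitAux_no_dash {a : List Char} (ha : '-' ∉ a) (cur : List Char) :
    pvSplitAux a cur = [cur.reverse ++ a] := by
  have := pv_splitAux_append ha [] cur
  simp only [List.append_nil] at this
  rw [this]
  simp [pvSplitAux]

lemma pv_length_splitAux : ∀ (l cur : List Char), (pvSplitAux l cur).length = l.count '-' + 1 := by
  intro l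
  induction l with
  | nil => intro cur; simp [pvSplitAux]
  | cons c rest ih =>
    intro cur
    by_cases hc : c = '-'
    · subst hc; simp [pvSplitAux, ih]
    · simp [pvSplitAux, hc, ih]

lemma pv_splitAux_ne_nil (l cur : List Char) : pvSplitAux l cur ≠ [] := by
  intro h
  have := pv_length_splitAux l cur
  rw [h] at this
  simp at this

def pvJoinDash : List (List Char) → List Char
  | [] => []
  | [p] => p
  | p :: ps => p ++ '-' :: pvJoinDash ps

lemma pv_joinDash_splitAux : ∀ (l cur : List Char), pvJoinDash (pvSplitAux l cur) = cur.reverse ++ l := by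
  intro l
  induction l with
  | nil => intro cur; simp [pvSplitAux, pvJoinDash]
  | cons c rest ih =>
    intro cur
    by_cases hc : c = '-'
    · subst hc
      rw [show pvSplitAux ('-' :: rest) cur = cur.reverse :: pvSplitAux rest [] from by
        simp [pvSplitAux]]
      have h2 : pvJoinDash (cur.reverse :: pvSplitAux rest []) =
          cur.reverse ++ '-' :: pvJoinDash (pvSplitAux rest []) := by
        cases h : pvSplitAux rest [] with
        | nil => exact absurd h (pv_splitAux_ne_nil rest [])
        | cons p ps => simp [pvJoinDash]
      rw [h2, ih []]
      simp
    · rw [show pvSplitAux (c :: rest) cur = pvSplitAux rest (c :: cur) from by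
        simp [pvSplitAux, hc]]
      rw [ih (c :: cur)]
      simp

lemma pv_hexRun_eq_some_iff (n : Nat) : ∀ (cs r : List Char),
    pvHexRun n cs = some r ↔ ∃ h, cs = h ++ r ∧ h.length = n ∧ ∀ x ∈ h, pvIsHex x := by
  induction n with
  | zero =>
    intro cs r
    simp only [pvHexRun, Option.some_inj]
    constructor
    · rintro rfl; exact ⟨[], by simp⟩
    · rintro ⟨h, rfl, hlen, _⟩
      rw [List.length_eq_zero_iff] at hlen
      subst hlen; simp
  | succ n ih =>
    intro cs r
    cases cs with
    | nil =>
      simp only [pvHexRun]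
      constructor
      · intro h; cases h
      · rintro ⟨h, habs, hlen, _⟩
        exfalso
        have : h.length + r.length = 0 := by
          have := congrArg List.length habs; simpa using this.symm
        omega
    | cons c cs =>
      simp only [pvHexRun]
      by_cases hx : pvIsHex c
      · rw [if_pos hx, ih]
        constructor
        · rintro ⟨h, rfl, hlen, hall⟩
          exact ⟨c :: h, by simp, by simp [hlen], by
            intro x hxm; rcases List.mem_cons.mp hxm with rfl | hxm
            · exact hx
            · exact hall x hxm⟩
        · rintro ⟨h, heq, hlen, hall⟩
          cases h with
          | nil => simp at hlen
          | cons y h =>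
            simp only [List.cons_append, List.cons.injEq] at heq
            obtain ⟨rfl, rfl⟩ := heq
            exact ⟨h, rfl, by simpa using hlen, fun x hm => hall x (List.mem_cons_of_mem _ hm)⟩
      · rw [if_neg hx]
        constructor
        · intro h; cases h
        · rintro ⟨h, heq, hlen, hall⟩
          cases h with
          | nil => simp at hlen
          | cons y h =>
            simp only [List.cons_append, List.cons.injEq] at heq
            exact absurd (heq.1 ▸ hall y (by simp)) hx
lemma pv_dash_eq_some_iff (cs r : List Char) : pvDash cs = some r ↔ cs = '-' :: r := by
  cases cs with
  | nil => simp [pvDash]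
  | cons c cs =>
    by_cases hc : c = '-'
    · subst hc; simp [pvDash]
    · have hnone : pvDash (c :: cs) = none := by
        rw [pvDash.eq_def]; cases c; simp_all
      rw [hnone]
      constructor
      · intro h; cases h
      · intro h
        exact absurd (by injection h) hc

-- the decomposition the UUID pattern describes (proof device shared by both directions)
def pvShape (cs : List Char) : Prop :=
  ∃ a b c d e : List Char,
    cs = a ++ '-' :: (b ++ '-' :: (c ++ '-' :: (d ++ '-' :: e))) ∧
    a.length = 8 ∧ b.length = 4 ∧ c.length = 4 ∧ d.length = 4 ∧ e.length = 12 ∧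
    (∀ x ∈ a, pvIsHex x) ∧ (∀ x ∈ b, pvIsHex x) ∧ (∀ x ∈ c, pvIsHex x) ∧
    (∀ x ∈ d, pvIsHex x) ∧ (∀ x ∈ e, pvIsHex x)

lemma pv_hexRun_append (n : Nat) (a r : List Char) (hlen : a.length = n)
    (h : ∀ x ∈ a, pvIsHex x) : pvHexRun n (a ++ r) = some r :=
  (pv_hexRun_eq_some_iff n (a ++ r) r).mpr ⟨a, rfl, hlen, h⟩

lemma pv_dash_cons (r : List Char) : pvDash ('-' :: r) = some r := rfl

lemma pv_uuid_iff_shape (name : String) : pvUuidFullmatch name = true ↔ pvShape name.toList := by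
  unfold pvUuidFullmatch
  rw [beq_iff_eq]
  constructor
  · intro h
    obtain ⟨r8, h8, h12⟩ := Option.bind_eq_some_iff.mp h
    obtain ⟨r7, h7, hd4⟩ := Option.bind_eq_some_iff.mp h8
    obtain ⟨r6, h6, hx6⟩ := Option.bind_eq_some_iff.mp h7
    obtain ⟨r5, h5, hd3⟩ := Option.bind_eq_some_iff.mp h6
    obtain ⟨r4, h4, hx4⟩ := Option.bind_eq_some_iff.mp h5
    obtain ⟨r3, h3, hd2⟩ := Option.bind_eq_some_iff.mp h4
    obtain ⟨r2, h2, hx2⟩ := Option.bind_eq_some_iff.mp h3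
    obtain ⟨r1, h1, hd1⟩ := Option.bind_eq_some_iff.mp h2
    obtain ⟨a, hL, ha, hha⟩ := (pv_hexRun_eq_some_iff _ _ _).mp h1
    rw [pv_dash_eq_some_iff] at hd1 hd2 hd3 hd4
    obtain ⟨b, hr2, hb, hhb⟩ := (pv_hexRun_eq_some_iff _ _ _).mp hx2
    obtain ⟨c, hr4, hc, hhc⟩ := (pv_hexRun_eq_some_iff _ _ _).mp hx4
    obtain ⟨d, hr6, hd, hhd⟩ := (pv_hexRun_eq_some_iff _ _ _).mp hx6
    obtain ⟨e, hr8, he, hhe⟩ := (pv_hexRun_eq_some_iff _ _ _).mp h12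
    refine ⟨a, b, c, d, e, ?_, ha, hb, hc, hd, by simpa using he, hha, hhb, hhc, hhd,
      fun x hx => hhe x hx⟩
    rw [hL, hd1, hr2, hd2, hr4, hd3, hr6, hd4, hr8]
    simp
  · rintro ⟨a, b, c, d, e, hcs, ha, hb, hc, hd, he, hha, hhb, hhc, hhd, hhe⟩
    rw [hcs]
    rw [pv_hexRun_append 8 a _ ha hha, Option.bind_some, pv_dash_cons, Option.bind_some,
        pv_hexRun_append 4 b _ hb hhb, Option.bind_some, pv_dash_cons, Option.bind_some,
        pv_hexRun_append 4 c _ hc hhc, Option.bind_some, pv_dash_cons, Option.bind_some,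
        pv_hexRun_append 4 d _ hd hhd, Option.bind_some, pv_dash_cons, Option.bind_some]
    have := pv_hexRun_append 12 e [] he hhe
    simpa using this

lemma pv_no_dash_of_hex {a : List Char} (h : ∀ x ∈ a, pvIsHex x = true) : '-' ∉ a := by
  intro hm
  have := h '-' hm
  simp [pvIsHex] at this

lemma pv_acond_iff_shape (name : String) :
    ((PySem.Str.count name "-" == 4)
      && (PySem.Chars.splitOn name.toList "-".toList).all
           (fun part => PySem.Set.issubset (PySem.Set.ofList part) pvHexdigits)
      && ((PySem.Chars.splitOn name.toList "-".toList).zip [8, 4, 4, 4, 12]).all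
           (fun pc => pc.1.length == pc.2)) = true ↔ pvShape name.toList := by
  rw [show ("-" : String).toList = ['-'] from by decide]
  rw [show PySem.Str.count name "-" = PySem.Chars.count name.toList ['-'] from by
    simp [PySem.Str.count]]
  rw [pv_count_dash, pv_splitOn_dash]
  have hsub : ∀ part : List Char,
      PySem.Set.issubset (PySem.Set.ofList part) pvHexdigits = part.all pvIsHex := by
    intro part
    simp only [PySem.Set.issubset]
    rw [Bool.eq_iff_iff]
    simp only [List.all_eq_true]
    constructor
    · intro h x hx
      rw [← pv_hex_eq]
      exact h x (by rw [PySem.Set.mem_ofList]; exact hx)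
    · intro h x hx
      rw [pv_hex_eq]
      exact h x (by rwa [PySem.Set.mem_ofList] at hx)
  constructor
  · intro h
    simp only [Bool.and_eq_true, beq_iff_eq] at h
    obtain ⟨⟨hcnt, hall⟩, hzip⟩ := h
    have hlen5 : (pvSplitAux name.toList []).length = 5 := by
      rw [pv_length_splitAux, hcnt]
    rcases hps : pvSplitAux name.toList [] with _ | ⟨p1, _ | ⟨p2, _ | ⟨p3, _ | ⟨p4, _ | ⟨p5, rest⟩⟩⟩⟩⟩ <;>
      rw [hps] at hlen5 <;> simp at hlen5
    subst hlen5
    have hjoin := pv_joinDash_splitAux name.toList []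
    rw [hps] at hjoin
    simp only [pvJoinDash, List.reverse_nil, List.nil_append] at hjoin
    rw [hps] at hall hzip
    simp only [List.all_cons, List.all_nil, Bool.and_eq_true, hsub] at hall
    simp only [List.zip_cons_cons, List.zip_nil_left, List.all_cons, List.all_nil,
      Bool.and_eq_true, beq_iff_eq, and_true] at hzip
    obtain ⟨hp1, hp2, hp3, hp4, hp5⟩ := hzip
    obtain ⟨hx1, hx2, hx3, hx4, hx5⟩ := hall
    refine ⟨p1, p2, p3, p4, p5, ?_, hp1, hp2, hp3, hp4, hp5,
      by simpa [List.all_eq_true] using hx1, by simpa [List.all_eq_true] using hx2,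
      by simpa [List.all_eq_true] using hx3, by simpa [List.all_eq_true] using hx4,
      by simpa [List.all_eq_true] using hx5⟩
    rw [← hjoin]
  · rintro ⟨a, b, c, d, e, hcs, ha, hb, hc, hd, he, hha, hhb, hhc, hhd, hhe⟩
    have hna := pv_no_dash_of_hex hha
    have hnb := pv_no_dash_of_hex hhb
    have hnc := pv_no_dash_of_hex hhc
    have hnd := pv_no_dash_of_hex hhd
    have hne := pv_no_dash_of_hex hhe
    have hsplit : pvSplitAux name.toList [] = [a, b, c, d, e] := by
      rw [hcs]
      rw [pv_splitAux_append hna]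
      rw [show pvSplitAux ('-' :: (b ++ '-' :: (c ++ '-' :: (d ++ '-' :: e)))) (a.reverse ++ []) =
        (a.reverse ++ []).reverse :: pvSplitAux (b ++ '-' :: (c ++ '-' :: (d ++ '-' :: e))) [] from by
        simp [pvSplitAux]]
      rw [pv_splitAux_append hnb]
      rw [show pvSplitAux ('-' :: (c ++ '-' :: (d ++ '-' :: e))) (b.reverse ++ []) =
        (b.reverse ++ []).reverse :: pvSplitAux (c ++ '-' :: (d ++ '-' :: e)) [] from by
        simp [pvSplitAux]]
      rw [pv_splitAux_append hnc]
      rw [show pvSplitAux ('-' :: (d ++ '-' :: e)) (c.reverse ++ []) =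
        (c.reverse ++ []).reverse :: pvSplitAux (d ++ '-' :: e) [] from by
        simp [pvSplitAux]]
      rw [pv_splitAux_append hnd]
      rw [show pvSplitAux ('-' :: e) (d.reverse ++ []) =
        (d.reverse ++ []).reverse :: pvSplitAux e [] from by
        simp [pvSplitAux]]
      rw [pv_splitAux_no_dash hne]
      simp
    have hcnt : name.toList.count '-' = 4 := by
      have := pv_length_splitAux name.toList []
      rw [hsplit] at this
      simp at this
      omega
    simp only [hsplit, hcnt, List.all_cons, List.all_nil, List.zip_cons_cons, List.zip_nil_left,
      Bool.and_eq_true, beq_iff_eq, hsub, List.all_eq_true, and_true]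
    refine ⟨⟨trivial, hha, hhb, hhc, hhd, hhe⟩, ha, hb, hc, hd, he⟩

-- ===== VERDICT (by name: the statement is the Claim_ definition above) =====
theorem fastq_header_is_nanopore_spec : Claim_equal_fastq_header_is_nanopore := by
  intro header _ _
  unfold Spec_fastq_header_is_nanopore fastq_header_is_nanopore fastq_header_is_nanopore_alt
  cases PySem.Str.split₀ header with
  | nil => rfl
  | cons name metadata =>
    simp only []
    have huuid : pvUuidFullmatch name =
        ((PySem.Str.count name "-" == 4)
          && (PySem.Chars.splitOn name.toList "-".toList).all
               (fun part => PySem.Set.issubset (PySem.Set.ofList part) pvHexdigits)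
          && ((PySem.Chars.splitOn name.toList "-".toList).zip [8, 4, 4, 4, 12]).all
               (fun pc => pc.1.length == pc.2)) := by
      rw [Bool.eq_iff_iff, pv_uuid_iff_shape, ← pv_acond_iff_shape]
    rw [huuid]
    cases hc4 : (PySem.Str.count name "-" == 4) <;>
      cases hhex : (PySem.Chars.splitOn name.toList "-".toList).all
               (fun part => PySem.Set.issubset (PySem.Set.ofList part) pvHexdigits) <;>
      cases hlen : ((PySem.Chars.splitOn name.toList "-".toList).zip [8, 4, 4, 4, 12]).all
               (fun pc => pc.1.length == pc.2) <;>
      cases hch : metadata.any (fun m => PySem.Str.startswith m "ch") <;>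
      cases hst : metadata.any (fun m => PySem.Str.startswith m "st") <;>
      simp
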